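-- pv_equiv track=rewrite | github.com/cannedtomatoes/ProjectEuler | euler211.py | divisor_square_sums
-- ===== SOURCE A (Python) =====
-- def divisor_square_sums(limit):
--     divs = [1] * (limit + 1)
--     for i in range(2, limit // 2 + 1):
--         for j in range(i * 2, limit + 1, i):
--             divs[j] += (i*i)
--
--     for i in range(1, limit + 1):
--         divs[i] += i * i
--     return divs
-- ===== SOURCE B (Python) =====
-- def divisor_square_sums(limit):
--     # Divisor-pair sieve: seed cell n with 1 + n*n (divisors 1 and n), then for
--     # every factor pair d <= q add d*d (and q*q when distinct) to cell d*q.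
--     # The inner range is empty as soon as d*d > limit.
--     result = [1 + n * n for n in range(limit + 1)]
--     for d in range(2, limit + 1):
--         for q in range(d, limit // d + 1):
--             m = d * q
--             result[m] += d * d
--             if q > d:
--                 result[m] += q * q
--     return result
-- ===== Notes on version B (the rewrite author's own statement) =====
-- stated objective: alternative
-- what changed: Replaces A's harmonic sieve (for each i up to limit//2, bump every multiple of i, then a second fix-up pass adding n*n) by a divisor-pair enumeration: seed each cell with 1 + n*n, then for every factor pair d <= q (inner range empty once d*d > limit) add d*d and, when distinct, q*q to cell d*q.
import Mathlib
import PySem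

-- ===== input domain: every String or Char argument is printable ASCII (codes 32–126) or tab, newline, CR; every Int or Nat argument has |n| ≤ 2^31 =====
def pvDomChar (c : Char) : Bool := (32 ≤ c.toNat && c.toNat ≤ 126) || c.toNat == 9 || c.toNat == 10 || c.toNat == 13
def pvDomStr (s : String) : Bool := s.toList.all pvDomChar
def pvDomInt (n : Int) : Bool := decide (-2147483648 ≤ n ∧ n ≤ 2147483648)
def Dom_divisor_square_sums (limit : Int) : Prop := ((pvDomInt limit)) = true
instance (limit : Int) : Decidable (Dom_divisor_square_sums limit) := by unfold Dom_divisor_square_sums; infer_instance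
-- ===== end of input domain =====

-- B replaces A's multiple-marking sieve plus fix-up pass by a divisor-pair enumeration
-- seeded with 1 + n*n; a different traversal of the same work, not claimed faster.

-- ===== PORT A =====
-- Literal port of A. All list indices the loops touch are provably in range
-- (0 ≤ j ≤ limit < len(divs)), so pySetD/pyGetD are exact for `divs[j] += …`.
def divisor_square_sums (limit : Int) : List Int :=
  let divs0 := PySem.List.pyRepeat [(1 : Int)] (limit + 1)
  let divs1 := (PySem.List.pyRange 2 (PySem.Int.floordiv limit 2 + 1) 1).foldl
    (fun divs i =>
      (PySem.List.pyRange (i * 2) (limit + 1) i).foldl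
        (fun divs j => PySem.List.pySetD divs j (PySem.List.pyGetD divs j 0 + i * i)) divs)
    divs0
  (PySem.List.pyRange 1 (limit + 1) 1).foldl
    (fun divs i => PySem.List.pySetD divs i (PySem.List.pyGetD divs i 0 + i * i)) divs1

-- ===== PORT B =====
-- Literal port of Source B: seed result[n] = 1 + n*n, then walk factor pairs d ≤ q,
-- adding d*d (and q*q when q > d) to cell m = d*q.  Indices m are in range
-- (4 ≤ m = d*q ≤ limit), so pySetD/pyGetD are exact for `result[m] += …`.
def divisor_square_sums_alt (limit : Int) : List Int :=
  (PySem.List.pyRange 2 (limit + 1) 1).foldl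
    (fun result d =>
      (PySem.List.pyRange d (PySem.Int.floordiv limit d + 1) 1).foldl
        (fun result q =>
          let m := d * q
          let result := PySem.List.pySetD result m (PySem.List.pyGetD result m 0 + d * d)
          if q > d then PySem.List.pySetD result m (PySem.List.pyGetD result m 0 + q * q)
          else result)
        result)
    ((PySem.List.pyRange 0 (limit + 1) 1).map (fun n => 1 + n * n))

-- ===== PRECONDITION & SPEC =====
def Spec_divisor_square_sums (limit : Int) (out : List Int) : Prop := out = divisor_square_sums_alt limit
instance (limit : Int) (out : List Int) : Decidable (Spec_divisor_square_sums limit out) := by unfold Spec_divisor_square_sums; infer_instance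

-- ===== CLAIM (what is proved, stated in full; the proofs are below) =====
def Claim_equal_divisor_square_sums : Prop := ∀ (limit : Int), Dom_divisor_square_sums limit → Spec_divisor_square_sums limit (divisor_square_sums limit)

-- ===== LEMMAS AND PROOFS =====

-- one `xs[j] += v` step, index known to be in range
theorem addAt_length (l : List Int) (j v : Int) :
    (PySem.List.pySetD l j (PySem.List.pyGetD l j 0 + v)).length = l.length :=
  PySem.List.length_pySetD l j _

theorem addAt_getD (l : List Int) (j v : Int) (n : Nat)
    (hj0 : 0 ≤ j) (hjl : j < (l.length : Int)) (hn : n < l.length) :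
    (PySem.List.pySetD l j (PySem.List.pyGetD l j 0 + v)).getD n 0
      = l.getD n 0 + if (n : Int) = j then v else 0 := by
  rw [PySem.List.pySetD_of_nonneg l _ hj0, PySem.List.pyGetD_of_nonneg l _ hj0]
  have hjn : j.toNat < l.length := by omega
  have heq : ((n : Int) = j) ↔ (n = j.toNat) := by omega
  rw [List.getD_eq_getElem?_getD, List.getElem?_set, List.getD_eq_getElem?_getD]
  split_ifs with h1 h2 h2
  · subst h1
    simp [List.getElem?_eq_getElem hn, List.getD_eq_getElem?_getD]
  · omega
  · omega
  · simp

-- a whole loop of `xs[j] += f j` steps: cell n gains (number of visits to n) * f n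
theorem foldl_addAt_getD (f : Int → Int) (js : List Int) (l : List Int) (n : Nat)
    (hn : n < l.length) (hjs : ∀ j ∈ js, 0 ≤ j ∧ j < (l.length : Int)) :
    ((js.foldl (fun l j => PySem.List.pySetD l j (PySem.List.pyGetD l j 0 + f j)) l).getD n 0)
      = l.getD n 0 + (js.count ((n : Nat) : Int) : Int) * f (n : Int) := by
  induction js generalizing l with
  | nil => simp
  | cons j js ih =>
    have hj := hjs j (by simp)
    have hlen := addAt_length l j (f j)
    rw [List.foldl_cons, ih _ (by omega) (by intro x hx; rw [hlen]; exact hjs x (by simp [hx])),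
      addAt_getD l j (f j) n hj.1 hj.2 hn, List.count_cons]
    by_cases h : (n : Int) = j
    · simp [h, Int.add_mul, add_comm, add_assoc, add_left_comm]
    · have : ¬ (j = (n : Int)) := fun hh => h hh.symm
      simp [h, this]

theorem foldl_addAt_length (f : Int → Int) (js : List Int) (l : List Int) :
    ((js.foldl (fun l j => PySem.List.pySetD l j (PySem.List.pyGetD l j 0 + f j)) l).length)
      = l.length := by
  induction js generalizing l with
  | nil => rfl
  | cons j js ih => rw [List.foldl_cons, ih]; exact addAt_length l j (f j)

theorem nodup_pyRange_pos (a b s : Int) (hs : 0 < s) :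
    (PySem.List.pyRange a b s).Nodup := by
  rw [PySem.List.pyRange_of_pos a b hs]
  refine (List.nodup_range).map ?_
  intro x y h
  have : (x : Int) = y := by nlinarith [h]
  exact_mod_cast this

theorem count_eq_ite (l : List Int) (h : l.Nodup) (x : Int) :
    (l.count x : Int) = if x ∈ l then 1 else 0 := by
  split_ifs with hm
  · exact_mod_cast List.count_eq_one_of_mem h hm
  · exact_mod_cast List.count_eq_zero_of_not_mem hm

-- A's sieve pass: cell n gains i*i for every outer i that divides n with i*2 ≤ n
theorem sieve_getD (limit : Int) (L : Nat) (hL : (L : Int) = limit + 1)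
    (is : List Int) (his : ∀ i ∈ is, 2 ≤ i) (l : List Int) (hl : l.length = L)
    (n : Nat) (hn : n < L) :
    ((is.foldl (fun divs i =>
        (PySem.List.pyRange (i * 2) (limit + 1) i).foldl
          (fun divs j => PySem.List.pySetD divs j (PySem.List.pyGetD divs j 0 + i * i)) divs) l).getD n 0)
      = l.getD n 0
        + (is.map (fun i => if i * 2 ≤ (n : Int) ∧ i ∣ (n : Int) then i * i else 0)).sum := by
  induction is generalizing l with
  | nil => simp
  | cons i is ih =>
    have hi : 2 ≤ i := his i (by simp)
    have hipos : (0 : Int) < i := by omega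
    have hjs : ∀ j ∈ PySem.List.pyRange (i * 2) (limit + 1) i, 0 ≤ j ∧ j < (l.length : Int) := by
      intro j hj
      have := (PySem.List.mem_pyRange_iff_of_pos hipos j).mp hj
      constructor
      · nlinarith [this.1]
      · omega
    have hlen := foldl_addAt_length (fun _ => i * i) (PySem.List.pyRange (i * 2) (limit + 1) i) l
    rw [List.foldl_cons,
      ih (by intro x hx; exact his x (by simp [hx])) _ (by rw [hlen, hl]),
      foldl_addAt_getD (fun _ => i * i) _ l n (by omega) hjs,
      count_eq_ite _ (nodup_pyRange_pos _ _ _ hipos)]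
    have hmem : ((n : Int) ∈ PySem.List.pyRange (i * 2) (limit + 1) i)
        ↔ (i * 2 ≤ (n : Int) ∧ i ∣ (n : Int)) := by
      rw [PySem.List.mem_pyRange_iff_of_pos hipos]
      have h2 : i ∣ i * 2 := dvd_mul_right i 2
      constructor
      · rintro ⟨h1, -, h3⟩
        exact ⟨h1, by simpa using dvd_add h3 h2⟩
      · rintro ⟨h1, h3⟩
        exact ⟨h1, by omega, dvd_sub h3 h2⟩
    rw [List.map_cons, List.sum_cons]
    simp only [hmem]
    by_cases h : i * 2 ≤ (n : Int) ∧ i ∣ (n : Int)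
    · simp [h]; ring
    · simp [h]

-- the outer sieve loop preserves the array's length
theorem sieve_length (limit : Int) (is : List Int) (l : List Int) :
    ((is.foldl (fun divs i =>
        (PySem.List.pyRange (i * 2) (limit + 1) i).foldl
          (fun divs j => PySem.List.pySetD divs j (PySem.List.pyGetD divs j 0 + i * i)) divs) l).length)
      = l.length := by
  induction is generalizing l with
  | nil => rfl
  | cons i is ih =>
    rw [List.foldl_cons, ih]
    exact foldl_addAt_length (fun _ => i * i) _ l

-- A's result, cell by cell
theorem A_getD (limit : Int) (hlim : 0 ≤ limit) (k : Nat) (hk : (k : Int) < limit + 1) :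
    (divisor_square_sums limit).getD k 0
      = 1 + (k : Int) * (k : Int)
        + ((PySem.List.pyRange 2 (PySem.Int.floordiv limit 2 + 1) 1).map
            (fun i => if i * 2 ≤ (k : Int) ∧ i ∣ (k : Int) then i * i else 0)).sum := by
  simp only [divisor_square_sums]
  rw [PySem.List.pyRepeat_singleton]
  set L : Nat := (limit + 1).toNat with hLdef
  have hL : (L : Int) = limit + 1 := by omega
  have hkL : k < L := by omega
  have hlen1 : ((PySem.List.pyRange 2 (PySem.Int.floordiv limit 2 + 1) 1).foldl
      (fun divs i =>
        (PySem.List.pyRange (i * 2) (limit + 1) i).foldl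
          (fun divs j => PySem.List.pySetD divs j (PySem.List.pyGetD divs j 0 + i * i)) divs)
      (List.replicate L 1)).length = L := by
    rw [sieve_length]; exact List.length_replicate
  rw [foldl_addAt_getD (fun i => i * i) _ _ k (by omega)
      (by intro j hj
          have := PySem.List.mem_pyRange_one.mp hj
          constructor
          · omega
          · rw [hlen1]; omega),
    count_eq_ite _ (nodup_pyRange_pos _ _ _ (by omega)),
    sieve_getD limit L hL _ (by intro i hi; exact (PySem.List.mem_pyRange_one.mp hi).1)
      _ List.length_replicate k hkL]
  have hrep : (List.replicate L (1 : Int)).getD k 0 = 1 := by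
    simp [List.getD_eq_getElem?_getD, hkL]
  rw [hrep]
  by_cases h1 : (1 : Int) ≤ (k : Int)
  · have hmem : ((k : Int) ∈ PySem.List.pyRange 1 (limit + 1) 1) := by
      rw [PySem.List.mem_pyRange_one]; omega
    simp only [hmem, if_true]
    ring
  · have hk0 : (k : Int) = 0 := by omega
    have hmem : ¬ ((k : Int) ∈ PySem.List.pyRange 1 (limit + 1) 1) := by
      rw [PySem.List.mem_pyRange_one]; omega
    simp only [hmem, if_false]
    rw [hk0]; ring

-- ===== generic cell-tracking for folds that only rewrite cells of a fixed-length array =====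
theorem foldl_cell_length (body : List Int → Int → List Int) (qs : List Int) (L : Nat)
    (hlen : ∀ l q, q ∈ qs → l.length = L → (body l q).length = L) :
    ∀ l : List Int, l.length = L → (qs.foldl body l).length = L := by
  induction qs with
  | nil => intro l hl; exact hl
  | cons q qs ih =>
    intro l hl
    rw [List.foldl_cons]
    exact ih (fun l' q' hq' => hlen l' q' (by simp [hq'])) _ (hlen l q (by simp) hl)

theorem foldl_cell (body : List Int → Int → List Int) (c : Int → Nat → Int) (qs : List Int) (L : Nat)
    (hlen : ∀ l q, q ∈ qs → l.length = L → (body l q).length = L)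
    (hget : ∀ l q, q ∈ qs → l.length = L → ∀ n : Nat, n < L →
      (body l q).getD n 0 = l.getD n 0 + c q n) :
    ∀ l : List Int, l.length = L → ∀ n : Nat, n < L →
      (qs.foldl body l).getD n 0 = l.getD n 0 + (qs.map (fun q => c q n)).sum := by
  induction qs with
  | nil => intro l hl n hn; simp
  | cons q qs ih =>
    intro l hl n hn
    rw [List.foldl_cons,
      ih (fun l' q' hq' => hlen l' q' (by simp [hq'])) (fun l' q' hq' => hget l' q' (by simp [hq']))
        _ (hlen l q (by simp) hl) n hn,
      hget l q (by simp) hl n hn, List.map_cons, List.sum_cons]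
    ring

-- ===== B-side: the pair loop, cell by cell =====
theorem pair_body_getD (d q : Int) (l : List Int) (hq : 0 ≤ d * q) (hql : d * q < (l.length : Int))
    (n : Nat) (hn : n < l.length) :
    ((fun result q =>
        let m := d * q
        let result := PySem.List.pySetD result m (PySem.List.pyGetD result m 0 + d * d)
        if q > d then PySem.List.pySetD result m (PySem.List.pyGetD result m 0 + q * q) else result)
      l q).getD n 0
    = l.getD n 0 + if (n : Int) = d * q then d * d + (if d < q then q * q else 0) else 0 := by
  simp only []
  by_cases hgt : q > d
  · rw [if_pos hgt,
      addAt_getD _ (d*q) (q*q) n hq (by rw [addAt_length]; exact hql) (by rw [addAt_length]; exact hn),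
      addAt_getD l (d*q) (d*d) n hq hql hn]
    by_cases h : (n : Int) = d * q
    · simp [h, hgt]; ring
    · simp [h]
  · rw [if_neg hgt, addAt_getD l (d*q) (d*d) n hq hql hn]
    by_cases h : (n : Int) = d * q
    · simp [h, hgt]
    · simp [h]

theorem pair_body_length (d q : Int) (l : List Int) :
    ((fun result q =>
        let m := d * q
        let result := PySem.List.pySetD result m (PySem.List.pyGetD result m 0 + d * d)
        if q > d then PySem.List.pySetD result m (PySem.List.pyGetD result m 0 + q * q) else result)
      l q).length = l.length := by
  simp only []
  by_cases hgt : q > d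
  · rw [if_pos hgt, addAt_length, addAt_length]
  · rw [if_neg hgt, addAt_length]

theorem sum_map_delta (l : List Int) (hl : l.Nodup) (a : Int) (f : Int → Int) :
    (l.map (fun q => if q = a then f q else 0)).sum = if a ∈ l then f a else 0 := by
  induction l with
  | nil => simp
  | cons x t ih =>
    rw [List.nodup_cons] at hl
    obtain ⟨hx, ht⟩ := hl
    by_cases hxa : x = a
    · subst hxa
      rw [List.map_cons, List.sum_cons, if_pos rfl, ih ht, if_neg hx,
        if_pos List.mem_cons_self, add_zero]
    · rw [List.map_cons, List.sum_cons, if_neg hxa, ih ht]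
      have hmem : (a ∈ x :: t) ↔ a ∈ t := by
        simp only [List.mem_cons, or_iff_right_iff_imp]
        intro h; exact absurd h.symm hxa
      rw [zero_add]
      simp only [hmem]

-- the value B's pair loop adds to cell n for one fixed first factor d
def Vterm (n d : Int) : Int :=
  if d ∣ n ∧ d * d ≤ n then d * d + (if d * d < n then (n / d) * (n / d) else 0) else 0

theorem pair_inner_sum (limit d n : Int) (hd : 2 ≤ d) (h0 : 0 ≤ n) (h1 : n ≤ limit) :
    ((PySem.List.pyRange d (PySem.Int.floordiv limit d + 1) 1).map
        (fun q => if n = d * q then d * d + (if d < q then q * q else 0) else 0)).sum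
      = Vterm n d := by
  by_cases hdvd : d ∣ n
  · obtain ⟨e, he⟩ := hdvd
    have hd0 : d ≠ 0 := by omega
    have he0 : 0 ≤ e := by nlinarith [he ▸ h0]
    have hediv : n / d = e := by rw [he]; exact Int.mul_ediv_cancel_left e hd0
    have hcond : ∀ q : Int, (n = d * q) ↔ (q = e) := by
      intro q
      constructor
      · intro h; exact (mul_left_cancel₀ hd0 (he ▸ h)).symm
      · rintro rfl; exact he
    have hfun : (fun q => if n = d * q then d * d + (if d < q then q * q else 0) else 0)
        = (fun q : Int => if q = e then d * d + (if d < q then q * q else 0) else 0) := by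
      funext q
      exact if_congr (hcond q) rfl rfl
    rw [hfun, sum_map_delta _ (nodup_pyRange_pos _ _ 1 (by omega)) e _]
    have hmem : (e ∈ PySem.List.pyRange d (PySem.Int.floordiv limit d + 1) 1) ↔ d ≤ e := by
      rw [PySem.List.mem_pyRange_one]
      have : e ≤ PySem.Int.floordiv limit d :=
        (PySem.Int.le_floordiv_iff_mul_le (q := e) (a := limit) (b := d) (by omega)).mpr
          (by nlinarith [he])
      omega
    simp only [hmem]
    unfold Vterm
    have h2 : (d ≤ e) ↔ (d * d ≤ n) := by
      constructor
      · intro h; nlinarith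
      · intro h; nlinarith [he ▸ h]
    have h3 : (d < e) ↔ (d * d < n) := by
      constructor
      · intro h; nlinarith
      · intro h; nlinarith [he ▸ h]
    rw [hediv]
    by_cases hle : d ≤ e
    · have hc : d ∣ n ∧ d * d ≤ n := ⟨Dvd.intro _ he.symm, h2.mp hle⟩
      rw [if_pos hle, if_pos hc]
      by_cases hlt : d < e
      · rw [if_pos hlt, if_pos (h3.mp hlt)]
      · rw [if_neg hlt, if_neg (fun hh => hlt (h3.mpr hh))]
    · rw [if_neg hle, if_neg (fun hh : d ∣ n ∧ d * d ≤ n => hle (h2.mpr hh.2))]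
  · rw [List.sum_eq_zero, Vterm, if_neg (fun hh => hdvd hh.1)]
    intro x hx
    obtain ⟨q, hq, rfl⟩ := List.mem_map.mp hx
    rw [if_neg (fun hh => hdvd ⟨q, hh⟩)]

-- B's result, cell by cell
theorem alt_getD (limit : Int) (hlim : 0 ≤ limit) (k : Nat) (hk : (k : Int) < limit + 1) :
    (divisor_square_sums_alt limit).getD k 0
      = 1 + (k : Int) * (k : Int)
        + ((PySem.List.pyRange 2 (limit + 1) 1).map (fun d => Vterm (k : Int) d)).sum := by
  simp only [divisor_square_sums_alt]
  set L : Nat := (limit + 1).toNat with hLdef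
  have hL : (L : Int) = limit + 1 := by omega
  have hkL : k < L := by omega
  have hinit_len : ((PySem.List.pyRange 0 (limit + 1) 1).map (fun n => 1 + n * n)).length = L := by
    rw [List.length_map, PySem.List.length_pyRange_one]; omega
  have hbody_len : ∀ (l : List Int) (d : Int), d ∈ PySem.List.pyRange 2 (limit + 1) 1 →
      l.length = L →
      ((PySem.List.pyRange d (PySem.Int.floordiv limit d + 1) 1).foldl
        (fun result q =>
          let m := d * q
          let result := PySem.List.pySetD result m (PySem.List.pyGetD result m 0 + d * d)
          if q > d then PySem.List.pySetD result m (PySem.List.pyGetD result m 0 + q * q)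
          else result) l).length = L := by
    intro l d _ hl
    exact foldl_cell_length _ _ L (fun l' q _ hl' => by rw [pair_body_length d q l'] ; exact hl') l hl
  rw [foldl_cell _ (fun d n => Vterm (n : Int) d) _ L hbody_len
      (by
        intro l d hd hl n hn
        have h2d : 2 ≤ d := (PySem.List.mem_pyRange_one.mp hd).1
        rw [foldl_cell _ (fun q n => if (n : Int) = d * q then d * d + (if d < q then q * q else 0) else 0)
            _ L (fun l' q _ hl' => by rw [pair_body_length d q l'] ; exact hl')
            (by
              intro l' q hq hl' n' hn'
              have hmq := PySem.List.mem_pyRange_one.mp hq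
              have hql : q * d ≤ limit :=
                (PySem.Int.le_floordiv_iff_mul_le (q := q) (a := limit) (b := d) (by omega)).mp
                  (by omega)
              exact pair_body_getD d q l' (by nlinarith) (by rw [hl']; nlinarith) n' (by omega))
            l hl n hn]
        have hsum := pair_inner_sum limit d (n : Int) h2d (by omega) (by omega)
        exact congrArg (fun z => l.getD n 0 + z) hsum)
      _ hinit_len k hkL]
  congr 1
  rw [List.getD_eq_getElem _ 0 (by omega), List.getElem_map, PySem.List.getElem_pyRange_one]
  simp

-- ===== the bridge: list sums ↔ Finset sums ↔ divisor sums =====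
theorem pyRange_sum_eq_Ico (f : Int → Int) (a b : Int) :
    ((PySem.List.pyRange a b 1).map f).sum = ∑ i ∈ Finset.Ico a b, f i := by
  rcases le_or_gt a b with h | h
  · obtain ⟨m, hm⟩ : ∃ m : Nat, b = a + m := ⟨(b - a).toNat, by omega⟩
    subst hm
    induction m with
    | zero =>
      rw [PySem.List.pyRange_one_eq_nil (by omega), Finset.Ico_eq_empty (by omega)]
      simp
    | succ m ih =>
      have h1 : a ≤ a + (m : Int) := by omega
      have h2 : a + ((m + 1 : Nat) : Int) = (a + m) + 1 := by push_cast; ring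
      rw [h2, PySem.List.pyRange_one_succ_right h1, List.map_append, List.sum_append,
        Finset.Ico_add_one_right_eq_Icc _ _, ← Finset.Ico_insert_right h1, Finset.sum_insert (by simp)]
      simp [ih h1]
      ring
  · rw [PySem.List.pyRange_one_eq_nil (by omega), Finset.Ico_eq_empty (by omega)]
    simp

theorem sum_eq_sum_support (A B : Finset Int) (g : Int → Int)
    (hA : ∀ i ∈ A, g i ≠ 0 → i ∈ B) (hB : ∀ i ∈ B, g i ≠ 0 → i ∈ A) :
    ∑ i ∈ A, g i = ∑ i ∈ B, g i := by
  have h1 : ∑ i ∈ A ∩ B, g i = ∑ i ∈ A, g i :=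
    Finset.sum_subset Finset.inter_subset_left
      (by intro x hx hnx; by_contra hne; exact hnx (Finset.mem_inter.mpr ⟨hx, hA x hx hne⟩))
  have h2 : ∑ i ∈ A ∩ B, g i = ∑ i ∈ B, g i :=
    Finset.sum_subset Finset.inter_subset_right
      (by intro x hx hnx; by_contra hne; exact hnx (Finset.mem_inter.mpr ⟨hB x hx hne, hx⟩))
  exact h1.symm.trans h2

-- the reflection d ↦ N / d on the divisors of N: pair contributions = mid-range divisors
theorem keyNat (N : Nat) (hN : 1 ≤ N) :
    ∑ k ∈ N.divisors, (if 2 ≤ k ∧ k * 2 ≤ N then (k : Int) * k else 0)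
      = ∑ k ∈ N.divisors, (if 2 ≤ k ∧ k * k ≤ N then
          (k : Int) * k + (if k * k < N then ((N / k : Nat) : Int) * ((N / k : Nat) : Int) else 0)
        else 0) := by
  have hsplitR : ∀ k ∈ N.divisors,
      (if 2 ≤ k ∧ k * k ≤ N then
          (k : Int) * k + (if k * k < N then ((N / k : Nat) : Int) * ((N / k : Nat) : Int) else 0)
        else 0)
      = (if 2 ≤ k ∧ k * k ≤ N then (k : Int) * k else 0)
        + (if 2 ≤ k ∧ k * k < N then ((N / k : Nat) : Int) * ((N / k : Nat) : Int) else 0) := by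
    intro k _
    by_cases h1 : 2 ≤ k ∧ k * k ≤ N
    · by_cases h2 : k * k < N
      · simp [h1, h2, And.intro h1.1]
      · simp [h1, h2]
    · have h2 : ¬ (2 ≤ k ∧ k * k < N) := by omega
      simp [h1, h2]
  rw [Finset.sum_congr rfl hsplitR, Finset.sum_add_distrib]
  have hrefl := Nat.sum_div_divisors (α := Int) N
    (fun k => if 2 ≤ k ∧ k * k < N then ((N / k : Nat) : Int) * ((N / k : Nat) : Int) else 0)
  rw [← hrefl]
  have hrw : ∀ k ∈ N.divisors,
      (if 2 ≤ N / k ∧ (N / k) * (N / k) < N then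
          ((N / (N / k) : Nat) : Int) * ((N / (N / k) : Nat) : Int) else 0)
      = (if k * 2 ≤ N ∧ N < k * k then (k : Int) * k else 0) := by
    intro k hk
    obtain ⟨hdvd, hN0⟩ := Nat.mem_divisors.mp hk
    have hk0 : k ≠ 0 := by rintro rfl; exact hN0 (Nat.eq_zero_of_zero_dvd hdvd)
    obtain ⟨e, he⟩ := hdvd
    have hdiv : N / k = e := by rw [he]; exact Nat.mul_div_cancel_left e (by omega)
    have he0 : e ≠ 0 := by rintro rfl; omega
    have hNe : N / e = k := by rw [he]; exact Nat.mul_div_left k (by omega)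
    rw [hdiv, hNe]
    have hc : (2 ≤ e ∧ e * e < N) ↔ (k * 2 ≤ N ∧ N < k * k) := by
      constructor
      · rintro ⟨a, b⟩
        constructor
        · nlinarith
        · nlinarith [he ▸ b]
      · rintro ⟨a, b⟩
        constructor
        · nlinarith [he ▸ a]
        · nlinarith [he ▸ b]
    simp only [hc]
  rw [Finset.sum_congr rfl hrw]
  have hsplitL : ∀ k ∈ N.divisors,
      (if 2 ≤ k ∧ k * 2 ≤ N then (k : Int) * k else 0)
      = (if 2 ≤ k ∧ k * k ≤ N then (k : Int) * k else 0)
        + (if k * 2 ≤ N ∧ N < k * k then (k : Int) * k else 0) := by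
    intro k hk
    obtain ⟨hdvd, hN0⟩ := Nat.mem_divisors.mp hk
    have hk0 : k ≠ 0 := by rintro rfl; exact hN0 (Nat.eq_zero_of_zero_dvd hdvd)
    by_cases hs : k * k ≤ N
    · have h1 : (2 ≤ k ∧ k * 2 ≤ N) ↔ (2 ≤ k ∧ k * k ≤ N) := by
        constructor
        · rintro ⟨a, b⟩; exact ⟨a, hs⟩
        · rintro ⟨a, b⟩; exact ⟨a, by nlinarith⟩
      have h2 : ¬ (k * 2 ≤ N ∧ N < k * k) := by omega
      simp only [h1, h2, if_false, add_zero]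
    · have h1 : ¬ (2 ≤ k ∧ k * k ≤ N) := by omega
      have h2 : (2 ≤ k ∧ k * 2 ≤ N) ↔ (k * 2 ≤ N ∧ N < k * k) := by
        constructor
        · rintro ⟨a, b⟩; exact ⟨b, by omega⟩
        · rintro ⟨a, b⟩
          refine ⟨?_, a⟩
          by_contra hlt
          interval_cases k <;> omega
      simp only [h1, h2, if_false, zero_add]
  rw [Finset.sum_congr rfl hsplitL, Finset.sum_add_distrib]

-- A's sum over proper divisors in [2, n//2] = B's sum of pair contributions
theorem sums_eq_pairs (limit n : Int) (h0 : 0 ≤ n) (h1 : n ≤ limit) :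
    ((PySem.List.pyRange 2 (PySem.Int.floordiv limit 2 + 1) 1).map
        (fun i => if i * 2 ≤ n ∧ i ∣ n then i * i else 0)).sum
      = ((PySem.List.pyRange 2 (limit + 1) 1).map (fun d => Vterm n d)).sum := by
  rcases eq_or_lt_of_le h0 with hn0 | hn1
  · rw [List.sum_eq_zero, List.sum_eq_zero]
    · intro x hx
      obtain ⟨d, hd, rfl⟩ := List.mem_map.mp hx
      have h2d : 2 ≤ d := (PySem.List.mem_pyRange_one.mp hd).1
      rw [Vterm, if_neg]; rintro ⟨-, hh⟩; nlinarith [hn0]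
    · intro x hx
      obtain ⟨i, hi, rfl⟩ := List.mem_map.mp hx
      have h2i : 2 ≤ i := (PySem.List.mem_pyRange_one.mp hi).1
      rw [if_neg]; rintro ⟨hh, -⟩; omega
  · set N : Nat := n.toNat with hNdef
    have hNn : (N : Int) = n := by omega
    have hN1 : 1 ≤ N := by omega
    have hN0 : N ≠ 0 := by omega
    set DI : Finset Int := N.divisors.image (fun k : Nat => (k : Int)) with hDI
    have hmemDI : ∀ i : Int, i ∈ DI ↔ ∃ k ∈ N.divisors, (k : Int) = i := by
      intro i; simp [hDI]
    have hinj : Set.InjOn (fun k : Nat => (k : Int)) N.divisors := by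
      intro x _ y _ h; exact Nat.cast_injective h
    rw [pyRange_sum_eq_Ico]
    have hLcongr : ∑ i ∈ Finset.Ico 2 (PySem.Int.floordiv limit 2 + 1),
          (if i * 2 ≤ n ∧ i ∣ n then i * i else 0)
        = ∑ i ∈ Finset.Ico 2 (PySem.Int.floordiv limit 2 + 1),
          (if 2 ≤ i ∧ i * 2 ≤ n ∧ i ∣ n then i * i else 0) := by
      apply Finset.sum_congr rfl
      intro i hi
      have h2 : (2 : Int) ≤ i := (Finset.mem_Ico.mp hi).1
      by_cases hc : i * 2 ≤ n ∧ i ∣ n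
      · rw [if_pos hc, if_pos ⟨h2, hc⟩]
      · rw [if_neg hc, if_neg (fun hh => hc hh.2)]
    rw [hLcongr]
    have hLsupp : ∑ i ∈ Finset.Ico 2 (PySem.Int.floordiv limit 2 + 1),
          (if 2 ≤ i ∧ i * 2 ≤ n ∧ i ∣ n then i * i else 0)
        = ∑ i ∈ DI, (if 2 ≤ i ∧ i * 2 ≤ n ∧ i ∣ n then i * i else 0) := by
      apply sum_eq_sum_support
      · intro i _ hne
        have hc : 2 ≤ i ∧ i * 2 ≤ n ∧ i ∣ n := by
          by_contra hc; rw [if_neg hc] at hne; exact hne rfl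
        rw [hmemDI]
        refine ⟨i.toNat, Nat.mem_divisors.mpr ⟨?_, hN0⟩, by omega⟩
        have : (i.toNat : Int) ∣ (N : Int) := by
          rw [hNn, show ((i.toNat : Nat) : Int) = i by omega]; exact hc.2.2
        exact_mod_cast this
      · intro i hi hne
        have hc : 2 ≤ i ∧ i * 2 ≤ n ∧ i ∣ n := by
          by_contra hc; rw [if_neg hc] at hne; exact hne rfl
        rw [Finset.mem_Ico]
        have : i ≤ PySem.Int.floordiv limit 2 :=
          (PySem.Int.le_floordiv_iff_mul_le (q := i) (a := limit) (b := 2) (by omega)).mpr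
            (by omega)
        omega
    rw [hLsupp, hDI, Finset.sum_image hinj]
    rw [pyRange_sum_eq_Ico]
    have hRcongr : ∑ d ∈ Finset.Ico 2 (limit + 1), Vterm n d
        = ∑ d ∈ Finset.Ico 2 (limit + 1), (if 2 ≤ d then Vterm n d else 0) := by
      apply Finset.sum_congr rfl
      intro d hd
      rw [if_pos (Finset.mem_Ico.mp hd).1]
    rw [hRcongr]
    have hVne : ∀ d : Int, (if 2 ≤ d then Vterm n d else 0) ≠ 0 →
        2 ≤ d ∧ d ∣ n ∧ d * d ≤ n := by
      intro d hne
      by_cases h2 : 2 ≤ d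
      · rw [if_pos h2, Vterm] at hne
        by_cases hc : d ∣ n ∧ d * d ≤ n
        · exact ⟨h2, hc⟩
        · rw [if_neg hc] at hne; exact absurd rfl hne
      · rw [if_neg h2] at hne; exact absurd rfl hne
    have hRsupp : ∑ d ∈ Finset.Ico 2 (limit + 1), (if 2 ≤ d then Vterm n d else 0)
        = ∑ d ∈ DI, (if 2 ≤ d then Vterm n d else 0) := by
      apply sum_eq_sum_support
      · intro d _ hne
        obtain ⟨h2, hdvd, -⟩ := hVne d hne
        rw [hmemDI]
        refine ⟨d.toNat, Nat.mem_divisors.mpr ⟨?_, hN0⟩, by omega⟩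
        have : (d.toNat : Int) ∣ (N : Int) := by
          rw [hNn, show ((d.toNat : Nat) : Int) = d by omega]; exact hdvd
        exact_mod_cast this
      · intro d hd hne
        obtain ⟨h2, -, hsq⟩ := hVne d hne
        rw [Finset.mem_Ico]
        constructor
        · exact h2
        · nlinarith
    rw [hRsupp, hDI, Finset.sum_image hinj]
    have hLnat : (∑ k ∈ N.divisors, if 2 ≤ (k : Int) ∧ (k : Int) * 2 ≤ n ∧ (k : Int) ∣ n then (k : Int) * k else 0)
        = ∑ k ∈ N.divisors, (if 2 ≤ k ∧ k * 2 ≤ N then (k : Int) * k else 0) := by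
      apply Finset.sum_congr rfl
      intro k hk
      obtain ⟨hdvd, -⟩ := Nat.mem_divisors.mp hk
      have hdvdI : (k : Int) ∣ n := by rw [← hNn]; exact_mod_cast hdvd
      have hcond : (2 ≤ (k : Int) ∧ (k : Int) * 2 ≤ n ∧ (k : Int) ∣ n) ↔ (2 ≤ k ∧ k * 2 ≤ N) := by
        constructor
        · rintro ⟨a, b, -⟩; constructor <;> omega
        · rintro ⟨a, b⟩; refine ⟨by omega, by omega, hdvdI⟩
      exact if_congr hcond rfl rfl
    have hRnat : (∑ k ∈ N.divisors, if 2 ≤ (k : Int) then Vterm n (k : Int) else 0)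
        = ∑ k ∈ N.divisors, (if 2 ≤ k ∧ k * k ≤ N then
            (k : Int) * k + (if k * k < N then ((N / k : Nat) : Int) * ((N / k : Nat) : Int) else 0)
          else 0) := by
      apply Finset.sum_congr rfl
      intro k hk
      obtain ⟨hdvd, -⟩ := Nat.mem_divisors.mp hk
      have hk0 : k ≠ 0 := by rintro rfl; exact hN0 (Nat.eq_zero_of_zero_dvd hdvd)
      have hdvdI : (k : Int) ∣ n := by rw [← hNn]; exact_mod_cast hdvd
      have hediv : n / (k : Int) = ((N / k : Nat) : Int) := by
        rw [← hNn]; exact (Int.natCast_ediv N k).symm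
      unfold Vterm
      by_cases h2 : 2 ≤ (k : Int)
      · rw [if_pos h2]
        have hcond : ((k : Int) ∣ n ∧ (k : Int) * (k : Int) ≤ n) ↔ (2 ≤ k ∧ k * k ≤ N) := by
          constructor
          · rintro ⟨-, b⟩
            refine ⟨by omega, ?_⟩
            have : ((k * k : Nat) : Int) ≤ (N : Int) := by push_cast; rw [hNn]; exact b
            exact_mod_cast this
          · rintro ⟨-, b⟩
            refine ⟨hdvdI, ?_⟩
            have : ((k * k : Nat) : Int) ≤ (N : Int) := by exact_mod_cast b
            push_cast at this; rw [hNn] at this; exact this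
        have hcond2 : ((k : Int) * (k : Int) < n) ↔ (k * k < N) := by
          constructor
          · intro b
            have : ((k * k : Nat) : Int) < (N : Int) := by push_cast; rw [hNn]; exact b
            exact_mod_cast this
          · intro b
            have : ((k * k : Nat) : Int) < (N : Int) := by exact_mod_cast b
            push_cast at this; rw [hNn] at this; exact this
        rw [hediv]
        exact if_congr hcond (by rw [if_congr hcond2 rfl rfl]) rfl
      · rw [if_neg h2, if_neg (fun hh : 2 ≤ k ∧ k * k ≤ N => h2 (by omega)), eq_comm]
    exact (hLnat.trans (keyNat N hN1)).trans hRnat.symm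

-- B's length
theorem alt_length (limit : Int) (hlim : 0 ≤ limit) :
    (divisor_square_sums_alt limit).length = (limit + 1).toNat := by
  simp only [divisor_square_sums_alt]
  apply foldl_cell_length _ _ (limit + 1).toNat
  · intro l d _ hl
    exact foldl_cell_length _ _ _ (fun l' q _ hl' => by rw [pair_body_length d q l'] ; exact hl') l hl
  · rw [List.length_map, PySem.List.length_pyRange_one]; omega

-- A's length
theorem A_length (limit : Int) :
    (divisor_square_sums limit).length = (limit + 1).toNat := by
  simp only [divisor_square_sums]
  rw [foldl_addAt_length (fun i => i * i), sieve_length, PySem.List.pyRepeat_singleton]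
  exact List.length_replicate

-- ===== VERDICT (by name: the statement is the Claim_ definition above) =====
theorem divisor_square_sums_spec : Claim_equal_divisor_square_sums := by
  intro limit _
  show divisor_square_sums limit = divisor_square_sums_alt limit
  by_cases hlim : 0 ≤ limit
  · apply List.ext_getElem
    · rw [A_length, alt_length limit hlim]
    · intro k h1 h2
      have hk : (k : Int) < limit + 1 := by
        rw [A_length] at h1; omega
      rw [← List.getD_eq_getElem (divisor_square_sums limit) 0 h1,
        ← List.getD_eq_getElem (divisor_square_sums_alt limit) 0 h2,
        A_getD limit hlim k hk, alt_getD limit hlim k hk,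
        sums_eq_pairs limit (k : Int) (by omega) (by omega)]
  · have h1 : PySem.List.pyRange 2 (PySem.Int.floordiv limit 2 + 1) 1 = [] := by
      apply PySem.List.pyRange_one_eq_nil
      have := PySem.Int.floordiv_eq_ediv_of_pos (a := limit) (show (0:Int) < 2 by omega)
      omega
    have h2 : PySem.List.pyRange 1 (limit + 1) 1 = [] := by
      apply PySem.List.pyRange_one_eq_nil; omega
    have h3 : PySem.List.pyRange 0 (limit + 1) 1 = [] := by
      apply PySem.List.pyRange_one_eq_nil; omega
    have h4 : PySem.List.pyRange 2 (limit + 1) 1 = [] := by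
      apply PySem.List.pyRange_one_eq_nil; omega
    simp only [divisor_square_sums, divisor_square_sums_alt, h1, h2, h3, h4, List.foldl_nil,
      List.map_nil, PySem.List.pyRepeat_singleton]
    rw [show (limit + 1).toNat = 0 by omega]
    rfl
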